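-- pv_equiv track=rewrite | github.com/yalamix/pef | app/utils.py | format_subs
-- ===== SOURCE A (Python) =====
-- def format_subs(label: str) -> str:
--     label = label.replace('{','').replace('}','')
--     a = label.split('_')
--     if len(a) > 1:
--         total_subs = len(a) - 1
--         label = '<sub>'.join(a)
--         for i in range(total_subs):
--             label += '</sub>'
--     return label
-- ===== SOURCE B (Python) =====
-- def format_subs(label: str) -> str:
--     label = label.replace('{', '').replace('}', '')
--     parts = label.split('_')
--     result = parts[-1]
--     for p in reversed(parts[:-1]):
--         result = p + '<sub>' + result + '</sub>'
--     return result
-- ===== Notes on version B (the rewrite author's own statement) =====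
-- stated objective: simpler
-- what changed: Replaces join-then-count-and-append-N-closing-tags by a single right-to-left fold over the split pieces that wraps one subscript level per step, with no length bookkeeping and no second loop.
import Mathlib
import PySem

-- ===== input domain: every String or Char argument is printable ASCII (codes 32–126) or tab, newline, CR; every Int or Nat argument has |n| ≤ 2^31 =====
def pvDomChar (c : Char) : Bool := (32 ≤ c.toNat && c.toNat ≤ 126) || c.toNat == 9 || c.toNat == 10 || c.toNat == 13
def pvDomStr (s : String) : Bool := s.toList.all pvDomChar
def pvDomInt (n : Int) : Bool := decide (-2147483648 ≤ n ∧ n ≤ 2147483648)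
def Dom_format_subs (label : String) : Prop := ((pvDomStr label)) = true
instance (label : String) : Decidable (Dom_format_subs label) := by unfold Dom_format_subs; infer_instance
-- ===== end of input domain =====

-- B builds the nested markup by wrapping one subscript level per fold step instead of
-- joining the pieces and appending a counted run of closing tags (objective: simpler).

-- ===== PORT A =====
def format_subs (label : String) : String :=
  let label := PySem.Str.replace (PySem.Str.replace label "{" "") "}" ""
  -- the separator "_" is a nonempty literal, so Python's split never raises: split? is `some`
  let a := (PySem.Str.split? label "_").getD []
  if a.length > 1 then
    let total_subs := a.length - 1
    let label := PySem.Str.join "<sub>" a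
    (PySem.List.pyRange 0 (total_subs : Int) 1).foldl (fun acc _ => acc ++ "</sub>") label
  else label

-- ===== PORT B =====
def format_subs_alt (label : String) : String :=
  let label := PySem.Str.replace (PySem.Str.replace label "{" "") "}" ""
  let parts := (PySem.Str.split? label "_").getD []
  -- split always yields at least one piece, so parts[-1] never raises
  let result := (PySem.List.pyGet? parts (-1)).getD ""
  ((PySem.List.slice parts none (some (-1))).reverse).foldl
    (fun r p => p ++ "<sub>" ++ r ++ "</sub>") result

-- ===== PRECONDITION & SPEC =====
def Spec_format_subs (label : String) (out : String) : Prop := out = format_subs_alt label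
instance (label : String) (out : String) : Decidable (Spec_format_subs label out) := by unfold Spec_format_subs; infer_instance

-- ===== CLAIM (what is proved, stated in full; the proofs are below) =====
def Claim_equal_format_subs : Prop := ∀ (label : String), Dom_format_subs label → Spec_format_subs label (format_subs label)

-- ===== LEMMAS AND PROOFS =====

-- splitOn.go never returns the empty list
lemma splitOn_go_ne_nil (sep : List Char) :
    ∀ (fuel : Nat) (l cur : List Char) (acc : List (List Char)),
      PySem.Chars.splitOn.go sep fuel l cur acc ≠ [] := by
  intro fuel
  induction fuel with
  | zero => intro l cur acc; simp [PySem.Chars.splitOn.go]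
  | succ n ih =>
    intro l cur acc
    cases l with
    | nil => simp [PySem.Chars.splitOn.go]
    | cons c rest =>
      simp only [PySem.Chars.splitOn.go]
      split
      · exact ih _ _ _
      · exact ih _ _ _

lemma splitOn_ne_nil (s sep : List Char) : PySem.Chars.splitOn s sep ≠ [] :=
  splitOn_go_ne_nil sep _ s [] []

-- join over nonempty lists: cons and snoc recurrences, and merging sep into the last piece
lemma join_cons_ne_nil (sep x : List Char) (t : List (List Char)) (ht : t ≠ []) :
    PySem.Chars.join sep (x :: t) = x ++ sep ++ PySem.Chars.join sep t := by
  cases t with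
  | nil => exact absurd rfl ht
  | cons y ys => exact PySem.Chars.join_cons_cons ..

lemma join_snoc (sep b : List Char) (ys : List (List Char)) (hy : ys ≠ []) :
    PySem.Chars.join sep (ys ++ [b]) = PySem.Chars.join sep ys ++ sep ++ b := by
  induction ys with
  | nil => exact absurd rfl hy
  | cons x xs ih =>
    cases xs with
    | nil => simp [PySem.Chars.join_cons_cons, PySem.Chars.join_singleton]
    | cons y ys' =>
      rw [List.cons_append, join_cons_ne_nil sep x _ (by simp),
          join_cons_ne_nil sep x _ (by simp), ih (by simp)]
      simp [List.append_assoc]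

lemma join_snoc_merge (sep a b : List Char) (xs : List (List Char)) :
    PySem.Chars.join sep (xs ++ [a ++ sep ++ b])
      = PySem.Chars.join sep (xs ++ [a]) ++ sep ++ b := by
  induction xs with
  | nil => simp [PySem.Chars.join_singleton, List.append_assoc]
  | cons x xs ih =>
    rw [List.cons_append, List.cons_append, join_cons_ne_nil sep x _ (by simp),
        join_cons_ne_nil sep x _ (by simp), ih]
    simp [List.append_assoc]

-- splitting then joining gives the original string back
lemma splitOn_go_join (sep : List Char) :
    ∀ (fuel : Nat) (l cur : List Char) (acc : List (List Char)),
      PySem.Chars.join sep (PySem.Chars.splitOn.go sep fuel l cur acc)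
        = PySem.Chars.join sep (acc.reverse ++ [cur.reverse ++ l]) := by
  intro fuel
  induction fuel with
  | zero =>
    intro l cur acc
    simp [PySem.Chars.splitOn.go]
  | succ n ih =>
    intro l cur acc
    cases l with
    | nil => simp [PySem.Chars.splitOn.go]
    | cons c rest =>
      simp only [PySem.Chars.splitOn.go]
      split
      · rename_i hpre
        rw [ih]
        have hl : c :: rest = sep ++ (c :: rest).drop sep.length := by
          have := List.isPrefixOf_iff_prefix.mp hpre
          exact (List.prefix_iff_eq_append.mp this).symm
        simp only [List.reverse_cons, List.reverse_nil, List.nil_append]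
        rw [join_snoc sep _ _ (by simp)]
        conv_rhs => rw [hl, show cur.reverse ++ (sep ++ (c :: rest).drop sep.length)
              = cur.reverse ++ sep ++ (c :: rest).drop sep.length from (List.append_assoc ..).symm,
            join_snoc_merge]
      · rw [ih]
        simp

lemma splitOn_join (s sep : List Char) :
    PySem.Chars.join sep (PySem.Chars.splitOn s sep) = s := by
  unfold PySem.Chars.splitOn
  rw [splitOn_go_join sep]
  simp [PySem.Chars.join_singleton]

-- the run of closing tags appended by A's counting loop
def closeRep : Nat → String
  | 0 => ""
  | n + 1 => closeRep n ++ "</sub>"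

lemma closeRep_toList (n : Nat) :
    (closeRep n).toList = (List.replicate n "</sub>".toList).flatten := by
  induction n with
  | zero => rfl
  | succ m ih =>
    show (closeRep m ++ "</sub>").toList = _
    rw [String.toList_append, ih, List.replicate_succ', List.flatten_append]
    simp

lemma closeRep_toList_succ (n : Nat) :
    (closeRep (n + 1)).toList = "</sub>".toList ++ (closeRep n).toList := by
  rw [closeRep_toList, closeRep_toList, List.replicate_succ, List.flatten_cons]

lemma foldl_close (t : List Int) (start : String) :
    t.foldl (fun acc _ => acc ++ "</sub>") start = start ++ closeRep t.length := by
  induction t generalizing start with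
  | nil =>
    have : ∀ s : String, s ++ closeRep 0 = s := by
      intro s; apply String.toList_inj.mp; simp [closeRep]
    simp [this]
  | cons x xs ih =>
    simp only [List.foldl_cons, List.length_cons, ih]
    apply String.toList_inj.mp
    simp [closeRep_toList_succ, String.toList_append]

lemma pyRange_len (n : Nat) : (PySem.List.pyRange 0 (n : Int) 1).length = n := by
  simp [PySem.List.pyRange]
  omega

-- String-level join recurrence
lemma sjoin_cons_cons (sep a b : String) (t : List String) :
    PySem.Str.join sep (a :: b :: t) = a ++ sep ++ PySem.Str.join sep (b :: t) := by
  apply String.toList_inj.mp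
  simp [PySem.Str.toList_join, String.toList_append, PySem.Chars.join_cons_cons]

lemma sjoin_singleton (a : String) (sep : String) :
    PySem.Str.join sep [a] = a := by
  apply String.toList_inj.mp
  simp [PySem.Str.toList_join, PySem.Chars.join_singleton]

lemma sjoin_cons_append (sep a last : String) (xs : List String) :
    PySem.Str.join sep (a :: (xs ++ [last])) = a ++ sep ++ PySem.Str.join sep (xs ++ [last]) := by
  cases xs with
  | nil => exact sjoin_cons_cons sep a last []
  | cons b t => exact sjoin_cons_cons sep a b (t ++ [last])

-- B's wrapping fold equals A's join followed by the closing-tag run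
lemma wrap_eq (xs : List String) (last : String) :
    xs.foldr (fun p r => p ++ "<sub>" ++ r ++ "</sub>") last
      = PySem.Str.join "<sub>" (xs ++ [last]) ++ closeRep xs.length := by
  induction xs with
  | nil =>
    apply String.toList_inj.mp
    simp [sjoin_singleton, closeRep]
  | cons p xs ih =>
    simp only [List.foldr_cons, ih, List.cons_append, List.length_cons]
    rw [sjoin_cons_append]
    apply String.toList_inj.mp
    have : closeRep (xs.length + 1) = closeRep xs.length ++ "</sub>" := rfl
    simp [this, String.toList_append]

-- ===== VERDICT (by name: the statement is the Claim_ definition above) =====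
lemma pyGet?_neg_one_concat {α : Type} (ys : List α) (b : α) :
    PySem.List.pyGet? (ys ++ [b]) (-1) = some b := by
  simp [PySem.List.pyGet?, PySem.List.pyIdx?]

theorem format_subs_spec : Claim_equal_format_subs := by
  intro label _
  unfold Spec_format_subs format_subs format_subs_alt
  simp only [PySem.Str.split?, PySem.Chars.split?]
  set s := PySem.Str.replace (PySem.Str.replace label "{" "") "}" "" with hs
  have hsep : ("_".toList).isEmpty = false := rfl
  rw [hsep]
  simp only [Bool.false_eq_true, if_false, Option.map_some, Option.getD_some]
  set ps := PySem.Chars.splitOn s.toList "_".toList with hps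
  have hne : ps ≠ [] := splitOn_ne_nil _ _
  have hjoin : PySem.Chars.join "_".toList ps = s.toList := splitOn_join _ _
  set a : List String := ps.map String.ofList with ha
  have hane : a ≠ [] := by simp [ha, hne]
  -- decompose a as dropLast ++ [last]
  obtain ⟨ys, b, hab⟩ : ∃ ys bb, a = ys ++ [bb] :=
    ⟨a.dropLast, a.getLast hane, (List.dropLast_concat_getLast hane).symm⟩
  rw [hab]
  rw [pyGet?_neg_one_concat, Option.getD_some, PySem.List.slice_to_neg_one,
      List.dropLast_concat, List.foldl_reverse]
  rw [wrap_eq ys b]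
  by_cases hlen : (ys ++ [b]).length > 1
  · rw [if_pos hlen]
    rw [foldl_close, pyRange_len]
    have hl1 : (ys ++ [b]).length - 1 = ys.length := by simp
    rw [hl1]
  · rw [if_neg hlen]
    -- a single piece: ys = [], a = [b], and b = s
    have hys : ys = [] := by
      cases ys with
      | nil => rfl
      | cons y t => simp at hlen
    subst hys
    simp only [List.nil_append, List.length_nil]
    have hb : ps = [b.toList] := by
      have := congrArg (List.map String.toList) hab
      simp only [ha] at this
      simpa [List.map_map, Function.comp] using this
    have : PySem.Chars.join "_".toList [b.toList] = s.toList := hb ▸ hjoin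
    rw [PySem.Chars.join_singleton] at this
    have hbs : b = s := String.toList_inj.mp this
    rw [hbs, sjoin_singleton]
    apply String.toList_inj.mp
    simp [closeRep]
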